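-- pv_equiv track=rewrite | github.com/EugeneKotlyarov/goit-algo-hw-08 | 01.py | min_overhead
-- ===== SOURCE A (Python) =====
-- import heapq
--
-- def min_overhead(wires):
--
--     heapq.heapify(wires)
--     overhead_sum = 0
--
--     # 1. знаходимо та додаємо до загального результату суму двох найменших елементів купи
--     # 2. почергово видаляємо їх
--     # 3. утворений кабель у п.1 повертаємо до купи
--     while len(wires) > 1:
--         overhead_cur = sum(heapq.nsmallest(2, wires))
--         overhead_sum += overhead_cur
--         heapq.heappop(wires)
--         heapq.heappop(wires)
--         heapq.heappush(wires, overhead_cur)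
--
--     return overhead_sum
-- ===== SOURCE B (Python) =====
-- def min_overhead(wires):
--     # Two-queue Huffman merge: sort the leaves once, then maintain two
--     # front-pointers, i into the sorted leaves and j into the (automatically
--     # nondecreasing) list of already-made merge sums; each of the n - 1 merge
--     # rounds takes its two operands from the queue fronts in O(1), so no heap
--     # and no per-round reinsertion or rescan is needed.
--     # Return value only: unlike A, this does not mutate `wires` in place.
--     leaves = sorted(wires)
--     sums = []
--     i = 0
--     j = 0
--     total = 0
--     for _ in range(len(leaves) - 1):
--         pair = 0
--         for _ in range(2):
--             if j >= len(sums) or (i < len(leaves) and leaves[i] <= sums[j]):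
--                 pair += leaves[i]
--                 i += 1
--             else:
--                 pair += sums[j]
--                 j += 1
--         total += pair
--         sums.append(pair)
--     return total
-- ===== Notes on version B (the rewrite author's own statement) =====
-- stated objective: faster
-- what changed: Replaces A's heap loop (heapify, nsmallest(2) rescan, two heappops, heappush per round) by the two-queue Huffman merge: sort the leaves once, then take each round's two operands from the fronts of the sorted-leaves queue and the queue of previously made sums (which is provably nondecreasing), appending each new sum at the back in O(1); A mutates `wires` in place while B does not (return-value equivalence only).
import Mathlib
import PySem

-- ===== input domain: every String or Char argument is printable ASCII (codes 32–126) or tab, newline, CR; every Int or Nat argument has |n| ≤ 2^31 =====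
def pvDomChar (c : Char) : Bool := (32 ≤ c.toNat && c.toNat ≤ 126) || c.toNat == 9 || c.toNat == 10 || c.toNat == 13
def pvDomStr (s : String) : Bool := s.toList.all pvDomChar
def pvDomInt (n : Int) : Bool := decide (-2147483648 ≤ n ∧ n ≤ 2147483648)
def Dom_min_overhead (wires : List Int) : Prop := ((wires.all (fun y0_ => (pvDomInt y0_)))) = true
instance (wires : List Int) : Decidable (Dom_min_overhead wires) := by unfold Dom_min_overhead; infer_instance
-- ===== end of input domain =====

-- B replaces A's heapq loop by the two-queue Huffman merge (sort once, then pop operands from the fronts of the leaf queue and the queue of made sums); return value only (A mutates `wires` in place, B does not).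


-- ===== PORT A =====
-- heapq.heappop at contract level: removes one occurrence of the heap's minimum
-- (the Python heap's internal layout is unobservable in the return value; heapify
-- is likewise the identity on the multiset of elements).
def pyHeapPop (xs : List Int) : List Int :=
  match PySem.List.min? xs (fun x => x) with
  | none => xs          -- heappop on an empty heap raises; unreachable under the loop guard
  | some m => xs.erase m

lemma pyHeapPop_length (xs : List Int) (h : xs ≠ []) :
    (pyHeapPop xs).length = xs.length - 1 := by
  unfold pyHeapPop
  cases hm : PySem.List.min? xs (fun x => x) with
  | none => exact absurd ((PySem.List.min?_eq_none_iff xs _).mp hm) h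
  | some m => exact List.length_erase_of_mem (PySem.List.min?_mem hm)

def minOverheadLoop (wires : List Int) (acc : Int) : Int :=
  if h : 1 < wires.length then
    -- heapq.nsmallest(2, wires) = sorted(wires)[:2]
    let cur := ((PySem.List.sorted wires (fun x => x) false).take 2).sum
    minOverheadLoop (pyHeapPop (pyHeapPop wires) ++ [cur]) (acc + cur)
  else acc
termination_by wires.length
decreasing_by
  have h1 : wires ≠ [] := by intro he; simp [he] at h
  have h2 : (pyHeapPop wires) ≠ [] := by
    have := pyHeapPop_length wires h1
    intro he; rw [he] at this; simp at this; omega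
  have := pyHeapPop_length wires h1
  have := pyHeapPop_length (pyHeapPop wires) h2
  simp only [List.length_append, List.length_cons, List.length_nil]
  omega

def min_overhead (wires : List Int) : Int :=
  -- heapq.heapify(wires): identity on the multiset of elements
  minOverheadLoop wires 0

-- ===== PORT B =====
-- Source B's index pointers i into `leaves` and j into `sums` are ported as the
-- unconsumed suffixes q1 and q2 (advancing a pointer = dropping the head);
-- sums.append(pair) appends at the back of q2.  takeQ is the body of the inner
-- `for _ in range(2)` branch: its condition, in the same order, reads
-- "j >= len(sums) or (i < len(leaves) and leaves[i] <= sums[j])".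
def takeQ (q1 q2 : List Int) : Int × List Int × List Int :=
  match q1, q2 with
  | a :: as_, [] => (a, as_, [])                -- j >= len(sums), take leaves[i]
  | [], [] => (0, [], [])                       -- leaves[i] out of range: unreachable (each round starts with ≥ 2 unconsumed values)
  | a :: as_, b :: bs =>
      if a ≤ b then (a, as_, b :: bs)           -- leaves[i] <= sums[j], take leaves[i]
      else (b, a :: as_, bs)                    -- take sums[j]
  | [], b :: bs => (b, [], bs)                  -- i exhausted, take sums[j]

-- the outer `for _ in range(len(leaves) - 1)` loop
def twoQueueLoop (k : Nat) (q1 q2 : List Int) (total : Int) : Int :=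
  match k with
  | 0 => total
  | Nat.succ k' =>
      let r1 := takeQ q1 q2
      let r2 := takeQ r1.2.1 r1.2.2
      let pair := r1.1 + r2.1
      twoQueueLoop k' r2.2.1 (r2.2.2 ++ [pair]) (total + pair)

def min_overhead_alt (wires : List Int) : Int :=
  let leaves := PySem.List.sorted wires (fun x => x) false
  twoQueueLoop (leaves.length - 1) leaves [] 0

-- ===== PRECONDITION & SPEC =====
def Spec_min_overhead (wires : List Int) (out : Int) : Prop := out = min_overhead_alt wires
instance (wires : List Int) (out : Int) : Decidable (Spec_min_overhead wires out) := by unfold Spec_min_overhead; infer_instance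

-- ===== CLAIM (what is proved, stated in full; the proofs are below) =====
def Claim_equal_min_overhead : Prop := ∀ (wires : List Int), Dom_min_overhead wires → Spec_min_overhead wires (min_overhead wires)

-- ===== LEMMAS AND PROOFS =====

-- ---- proof-side reference process: the sorted-reinsertion loop ----
def insertSorted (s : Int) (rest : List Int) : List Int :=
  rest.insertIdx (PySem.List.bisectLeft rest s) s

lemma insertIdx_eq_take_cons_drop (l : List Int) (i : Nat) (a : Int) (h : i ≤ l.length) :
    l.insertIdx i a = l.take i ++ a :: l.drop i := by
  induction l generalizing i with
  | nil =>
    have : i = 0 := by simpa using h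
    subst this; rfl
  | cons x xs ih =>
    cases i with
    | zero => rfl
    | succ j =>
      simp only [List.insertIdx_succ_cons, List.take_succ_cons, List.drop_succ_cons,
        List.cons_append]
      rw [ih j (by simpa using h)]

lemma insertSorted_length (s : Int) (l : List Int) (h : l.Pairwise (· ≤ ·)) :
    (insertSorted s l).length = l.length + 1 := by
  unfold insertSorted
  rw [List.length_insertIdx, if_pos (PySem.List.bisectLeft_spec l s h).1]

lemma insertSorted_perm (s : Int) (l : List Int) (h : l.Pairwise (· ≤ ·)) :
    (insertSorted s l).Perm (s :: l) :=
  List.perm_insertIdx s l (PySem.List.bisectLeft_spec l s h).1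

lemma insertSorted_pairwise (s : Int) (l : List Int) (h : l.Pairwise (· ≤ ·)) :
    (insertSorted s l).Pairwise (· ≤ ·) := by
  obtain ⟨hle, hlt, hge⟩ := PySem.List.bisectLeft_spec l s h
  set j := PySem.List.bisectLeft l s with hj
  unfold insertSorted
  rw [insertIdx_eq_take_cons_drop l j s hle]
  rw [List.pairwise_append]
  refine ⟨h.sublist (List.take_sublist j l), ?_, ?_⟩
  · refine List.pairwise_cons.mpr ⟨?_, h.sublist (List.drop_sublist j l)⟩
    intro y hy
    obtain ⟨m, hm, hym⟩ := List.mem_iff_getElem.mp hy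
    have hlen : (l.drop j).length = l.length - j := by simp
    have hjm : j + m < l.length := by omega
    have : (l.drop j)[m] = l[j + m] := by
      simp [List.getElem_drop]
    exact hym ▸ (this ▸ hge (j + m) hjm (by omega))
  · intro x hx y hy
    obtain ⟨m, hm, hxm⟩ := List.mem_iff_getElem.mp hx
    have hlen : (l.take j).length = min j l.length := by simp
    have hml : m < l.length := by omega
    have hmj : m < j := by omega
    have hxl : (l.take j)[m] = l[m] := by simp
    have hxs : x < s := by rw [← hxm, hxl]; exact hlt m hml hmj
    rcases List.mem_cons.mp hy with h' | h'
    · exact h' ▸ le_of_lt hxs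
    · obtain ⟨m', hm', hym'⟩ := List.mem_iff_getElem.mp h'
      have hjm' : j + m' < l.length := by simp at hm'; omega
      have : (l.drop j)[m'] = l[j + m'] := by simp [List.getElem_drop]
      have hsy : s ≤ y := by rw [← hym', this]; exact hge (j + m') hjm' (by omega)
      exact le_of_lt (lt_of_lt_of_le hxs hsy)

def altLoop (q : List Int) (acc : Int) : Int :=
  match q with
  | a :: b :: rest => altLoop (insertSorted (a + b) rest) (acc + (a + b))
  | _ => acc
termination_by q.length
decreasing_by
  have : (insertSorted (a + b) rest).length ≤ rest.length + 1 := by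
    unfold insertSorted
    rw [List.length_insertIdx]
    split <;> omega
  simp only [List.length_cons]
  omega

-- ---- A = altLoop ----

-- in a list permuting a sorted a :: t, the first extremal element has value a
lemma min?_of_perm_sorted (xs : List Int) (a : Int) (t : List Int)
    (hp : xs.Perm (a :: t)) (hs : (a :: t).Pairwise (· ≤ ·)) :
    ∃ m, PySem.List.min? xs (fun x => x) = some m ∧ m = a ∧
      (xs.erase m).Perm t := by
  have hne : xs ≠ [] := by
    intro he; rw [he] at hp; exact absurd hp.symm (by simp)
  cases hm : PySem.List.min? xs (fun x => x) with
  | none => exact absurd ((PySem.List.min?_eq_none_iff xs _).mp hm) hne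
  | some m =>
    have hmem : m ∈ xs := PySem.List.min?_mem hm
    have hmin := PySem.List.min?_isMin hm
    have hma : m ≤ a := hmin a (hp.mem_iff.mpr (List.mem_cons_self))
    have ham : a ≤ m := by
      have hmys : m ∈ a :: t := hp.mem_iff.mp hmem
      rcases List.mem_cons.mp hmys with h' | h'
      · exact le_of_eq h'.symm
      · exact (List.pairwise_cons.mp hs).1 m h'
    have heq : m = a := le_antisymm hma ham
    refine ⟨m, rfl, heq, ?_⟩
    have := hp.erase m
    rw [heq] at this ⊢
    simpa using this

lemma loop_eq (n : Nat) : ∀ (xs ys : List Int) (acc : Int), xs.length = n →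
    xs.Perm ys → ys.Pairwise (· ≤ ·) →
    minOverheadLoop xs acc = altLoop ys acc := by
  induction n using Nat.strong_induction_on with
  | _ n ih =>
    intro xs ys acc hlen hp hs
    by_cases hgt : 1 < xs.length
    · have hylen : 1 < ys.length := hp.length_eq ▸ hgt
      match ys, hylen with
      | a :: b :: rest, _ =>
        have hsorted : PySem.List.sorted xs (fun x => x) false = a :: b :: rest :=
          PySem.List.sorted_id_eq_of_perm_of_pairwise xs (a :: b :: rest) hp.symm hs
        obtain ⟨m1, hm1, hm1a, hp1⟩ := min?_of_perm_sorted xs a (b :: rest) hp hs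
        have hs2 : (b :: rest).Pairwise (· ≤ ·) := (List.pairwise_cons.mp hs).2
        obtain ⟨m2, hm2, hm2b, hp2⟩ := min?_of_perm_sorted (xs.erase m1) b rest hp1 hs2
        have hpop1 : pyHeapPop xs = xs.erase m1 := by unfold pyHeapPop; rw [hm1]
        have hpop2 : pyHeapPop (xs.erase m1) = (xs.erase m1).erase m2 := by
          unfold pyHeapPop; rw [hm2]
        rw [minOverheadLoop, dif_pos hgt]
        simp only [hsorted, hpop1, hpop2]
        have hcur : ((a :: b :: rest).take 2).sum = a + b := by simp
        rw [hcur]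
        have hnext : (((xs.erase m1).erase m2) ++ [a + b]).Perm
            (insertSorted (a + b) rest) := by
          have h1 : (((xs.erase m1).erase m2) ++ [a + b]).Perm
              ((a + b) :: ((xs.erase m1).erase m2)) := List.perm_append_comm
          have h2 : ((a + b) :: ((xs.erase m1).erase m2)).Perm ((a + b) :: rest) :=
            hp2.cons _
          exact (h1.trans h2).trans
            (insertSorted_perm (a + b) rest (List.pairwise_cons.mp hs2).2).symm
        have hlen' : (((xs.erase m1).erase m2) ++ [a + b]).length = n - 1 := by
          have e0 := hp.length_eq
          have e1 := hnext.length_eq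
          rw [insertSorted_length (a + b) rest (List.pairwise_cons.mp hs2).2] at e1
          simp only [List.length_cons] at e0
          omega
        have hrec := ih (n - 1) (by omega) _ _ (acc + (a + b)) hlen'
          hnext (insertSorted_pairwise (a + b) rest (List.pairwise_cons.mp hs2).2)
        rw [hrec]
        conv_rhs => rw [altLoop]
    · rw [minOverheadLoop, dif_neg hgt]
      have hle : ys.length ≤ 1 := by have := hp.length_eq; omega
      rcases ys with _ | ⟨c, _ | ⟨d, t⟩⟩
      · rw [altLoop]
        intro a b rest h
        simp at h
      · rw [altLoop]
        intro a b rest h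
        simp at h
      · simp at hle

-- ---- altLoop = twoQueueLoop ----

-- proof-side two-way merge with the same tie-break as takeQ (left queue first)
def mergeI : List Int → List Int → List Int
  | [], l => l
  | l, [] => l
  | a :: as_, b :: bs =>
      if a ≤ b then a :: mergeI as_ (b :: bs) else b :: mergeI (a :: as_) bs
termination_by l1 l2 => l1.length + l2.length

lemma mergeI_nil_right (l : List Int) : mergeI l [] = l := by
  cases l <;> simp [mergeI]

lemma mergeI_perm (l1 l2 : List Int) : (mergeI l1 l2).Perm (l1 ++ l2) := by
  fun_induction mergeI l1 l2 with
  | case1 l => simp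
  | case2 l => simp [List.Perm.refl]
  | case3 a as_ b bs h ih => simpa using ih.cons a
  | case4 a as_ b bs h ih =>
      refine (ih.cons b).trans ?_
      exact (List.perm_middle).symm.trans (by simp)

lemma mergeI_pairwise (l1 l2 : List Int) (h1 : l1.Pairwise (· ≤ ·))
    (h2 : l2.Pairwise (· ≤ ·)) : (mergeI l1 l2).Pairwise (· ≤ ·) := by
  fun_induction mergeI l1 l2 with
  | case1 l => exact h2
  | case2 l => exact h1
  | case3 a as_ b bs h ih =>
      refine List.pairwise_cons.mpr ⟨?_, ih (List.pairwise_cons.mp h1).2 h2⟩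
      intro x hx
      have hx' : x ∈ as_ ++ b :: bs := (mergeI_perm as_ (b :: bs)).mem_iff.mp hx
      rcases List.mem_append.mp hx' with hxa | hxb
      · exact (List.pairwise_cons.mp h1).1 x hxa
      · rcases List.mem_cons.mp hxb with he | hm
        · exact he ▸ h
        · exact le_trans h ((List.pairwise_cons.mp h2).1 x hm)
  | case4 a as_ b bs h ih =>
      have hba : b ≤ a := le_of_lt (lt_of_not_ge h)
      refine List.pairwise_cons.mpr ⟨?_, ih h1 (List.pairwise_cons.mp h2).2⟩
      intro x hx
      have hx' : x ∈ (a :: as_) ++ bs := (mergeI_perm (a :: as_) bs).mem_iff.mp hx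
      rcases List.mem_append.mp hx' with hxa | hxb
      · rcases List.mem_cons.mp hxa with he | hm
        · exact he ▸ hba
        · exact le_trans hba ((List.pairwise_cons.mp h1).1 x hm)
      · exact (List.pairwise_cons.mp h2).1 x hxb

lemma takeQ_spec (q1 q2 : List Int) (h : q1.length + q2.length ≠ 0) :
    mergeI q1 q2 = (takeQ q1 q2).1 :: mergeI (takeQ q1 q2).2.1 (takeQ q1 q2).2.2 ∧
    ((takeQ q1 q2).2.1 = q1 ∧ (takeQ q1 q2).2.2 = q2.tail ∧ q2 ≠ [] ∨
     (takeQ q1 q2).2.1 = q1.tail ∧ (takeQ q1 q2).2.2 = q2 ∧ q1 ≠ []) := by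
  match q1, q2 with
  | [], [] => simp at h
  | a :: as_, [] =>
      exact ⟨by simp [takeQ, mergeI_nil_right], Or.inr (by simp [takeQ])⟩
  | [], b :: bs =>
      exact ⟨by simp [takeQ, mergeI], Or.inl (by simp [takeQ])⟩
  | a :: as_, b :: bs =>
      by_cases hab : a ≤ b
      · exact ⟨by simp [takeQ, mergeI, hab], Or.inr (by simp [takeQ, hab])⟩
      · exact ⟨by simp [takeQ, mergeI, hab], Or.inl (by simp [takeQ, hab])⟩

-- sum of the two smallest values of a list (multiset-level; 0 if fewer than 2)
def s2 (l : List Int) : Int :=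
  match PySem.List.sorted l (fun x => x) false with
  | a :: b :: _ => a + b
  | _ => 0

lemma s2_perm (l l' : List Int) (h : l.Perm l') : s2 l = s2 l' := by
  unfold s2
  rw [PySem.List.sorted_eq_sorted_of_perm l l' (fun x => x) (fun a b hh => hh) h]

lemma s2_sorted_cons (a b : Int) (t : List Int) (h : (a :: b :: t).Pairwise (· ≤ ·)) :
    s2 (a :: b :: t) = a + b := by
  unfold s2
  rw [PySem.List.sorted_eq_self_of_pairwise _ _ h]

-- the invariant of the two-queue loop: every made sum still in q2 is at most
-- the sum of the two smallest of everything else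
def InvQ (q1 q2 : List Int) : Prop :=
  ∀ z ∈ q2, 3 ≤ q1.length + q2.length → z ≤ s2 (q1 ++ q2.erase z)

lemma append_erase_perm (q1 q2 : List Int) (z : Int) (hz : z ∈ q2) :
    (q1 ++ q2.erase z).Perm ((q1 ++ q2).erase z) := by
  have h1 : (q1 ++ q2).Perm (q2 ++ q1) := List.perm_append_comm
  have h2 : ((q1 ++ q2).erase z).Perm ((q2 ++ q1).erase z) := h1.erase z
  rw [List.erase_append_left _ hz] at h2
  exact (h2.trans List.perm_append_comm).symm

lemma erase_append_singleton_perm (l : List Int) (a : Int) :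
    ((l ++ [a]).erase a).Perm l := by
  by_cases h : a ∈ l
  · rw [List.erase_append_left _ h]
    exact (List.perm_append_comm.trans (List.perm_cons_erase h).symm)
  · rw [List.erase_append_right _ h]
    simp

-- the freshly made sum bounds a surviving older sum z from above
lemma key_bound (v z s : Int) (R : List Int) (hRv : ∀ x ∈ R, v ≤ x) (hR : R ≠ [])
    (hvz : v ≤ z) (hzs : z ≤ s) (hsv : s ≤ 2 * v) : z ≤ s2 (R ++ [s]) := by
  by_cases hv0 : v < 0
  · omega
  have hMp : (PySem.List.sorted (R ++ [s]) (fun x => x) false).Perm (R ++ [s]) :=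
    PySem.List.sorted_perm _ _ _
  have hMs : (PySem.List.sorted (R ++ [s]) (fun x => x) false).Pairwise (· ≤ ·) := by
    simpa using PySem.List.sorted_pairwise (R ++ [s]) (fun x => x)
  have hMlen : 2 ≤ (PySem.List.sorted (R ++ [s]) (fun x => x) false).length := by
    have := hMp.length_eq
    simp only [List.length_append, List.length_cons, List.length_nil] at this
    have : R.length ≠ 0 := fun he => hR (List.eq_nil_of_length_eq_zero he)
    omega
  cases hM : PySem.List.sorted (R ++ [s]) (fun x => x) false with
  | nil => rw [hM] at hMlen; simp at hMlen
  | cons m0 rest0 =>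
    cases rest0 with
    | nil => rw [hM] at hMlen; simp at hMlen
    | cons m1 rest =>
      rw [hM] at hMp hMs
      have hs2 : s2 (R ++ [s]) = m0 + m1 := by unfold s2; rw [hM]
      rw [hs2]
      have hmem : ∀ x ∈ (m0 :: m1 :: rest), v ≤ x ∨ x = s := by
        intro x hx
        rcases List.mem_append.mp (hMp.mem_iff.mp hx) with h' | h'
        · exact Or.inl (hRv x h')
        · exact Or.inr (by simpa using h')
      have hm0 := hmem m0 List.mem_cons_self
      have hm1 := hmem m1 (List.mem_cons_of_mem _ List.mem_cons_self)
      have hm01 : m0 ≤ m1 := (List.pairwise_cons.mp hMs).1 m1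
        List.mem_cons_self
      by_cases hm1v : v ≤ m1
      · rcases hm0 with h' | h' <;> omega
      · -- both m0 and m1 must be the single appended s: impossible
        have hsv' : s < v := by rcases hm1 with h' | h' <;> omega
        exfalso
        have hcount : (R ++ [s]).countP (fun x => decide (x < v)) = 1 := by
          rw [List.countP_append]
          have hR0 : R.countP (fun x => decide (x < v)) = 0 :=
            List.countP_eq_zero.mpr (fun x hx => by
              simpa using not_lt.mpr (hRv x hx))
          simp [hR0, hsv']
        have hMc : (m0 :: m1 :: rest).countP (fun x => decide (x < v)) = 1 :=
          (hMp.countP_eq _).trans hcount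
        have hsub : [m0, m1].Sublist (m0 :: m1 :: rest) :=
          (List.nil_sublist rest).cons₂ m1 |>.cons₂ m0
        have h2c : [m0, m1].countP (fun x => decide (x < v)) = 2 := by
          simp [show m0 < v by omega, show m1 < v by omega]
        have := hsub.countP_le (p := fun x => decide (x < v))
        omega

lemma altLoop_short (l : List Int) (acc : Int) (h : l.length ≤ 1) :
    altLoop l acc = acc := by
  rcases l with _ | ⟨a, _ | ⟨b, t⟩⟩
  · rw [altLoop]; intro a b rest h; simp at h
  · rw [altLoop]; intro a b rest h; simp at h
  · simp at h

lemma takeQ_facts (q1 q2 : List Int) (h : q1.length + q2.length ≠ 0)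
    (h1 : q1.Pairwise (· ≤ ·)) (h2 : q2.Pairwise (· ≤ ·)) :
    mergeI q1 q2 = (takeQ q1 q2).1 :: mergeI (takeQ q1 q2).2.1 (takeQ q1 q2).2.2 ∧
    (takeQ q1 q2).2.1.Pairwise (· ≤ ·) ∧ (takeQ q1 q2).2.2.Pairwise (· ≤ ·) ∧
    (takeQ q1 q2).2.1.length + (takeQ q1 q2).2.2.length + 1 = q1.length + q2.length ∧
    (takeQ q1 q2).2.1 ⊆ q1 ∧ (takeQ q1 q2).2.2 ⊆ q2 := by
  obtain ⟨hm, hc⟩ := takeQ_spec q1 q2 h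
  refine ⟨hm, ?_⟩
  rcases hc with ⟨e1, e2, hne⟩ | ⟨e1, e2, hne⟩
  · cases q2 with
    | nil => exact absurd rfl hne
    | cons b bs =>
      rw [e1, e2]
      exact ⟨h1, (List.pairwise_cons.mp h2).2, by simp; omega,
        List.Subset.refl _, List.subset_cons_self _ _⟩
  · cases q1 with
    | nil => exact absurd rfl hne
    | cons a as_ =>
      rw [e1, e2]
      exact ⟨(List.pairwise_cons.mp h1).2, h2, by simp; omega,
        List.subset_cons_self _ _, List.Subset.refl _⟩

lemma bridge : ∀ (k : Nat) (q1 q2 : List Int) (acc : Int),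
    q1.Pairwise (· ≤ ·) → q2.Pairwise (· ≤ ·) →
    q1.length + q2.length = k + 1 → InvQ q1 q2 →
    twoQueueLoop k q1 q2 acc = altLoop (mergeI q1 q2) acc := by
  intro k
  induction k with
  | zero =>
    intro q1 q2 acc h1 h2 hlen _
    have hm : (mergeI q1 q2).length ≤ 1 := by
      have := (mergeI_perm q1 q2).length_eq
      simp only [List.length_append] at this
      omega
    rw [twoQueueLoop, altLoop_short _ _ hm]
  | succ k' ih =>
    intro q1 q2 acc h1 h2 hlen hinv
    obtain ⟨hm1, hp1', hp2', hl1, hsub1, hsub2⟩ :=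
      takeQ_facts q1 q2 (by omega) h1 h2
    set u := (takeQ q1 q2).1 with hu
    set q1' := (takeQ q1 q2).2.1 with hq1'
    set q2' := (takeQ q1 q2).2.2 with hq2'
    obtain ⟨hm2, hp1'', hp2'', hl2, hsub1', hsub2'⟩ :=
      takeQ_facts q1' q2' (by omega) hp1' hp2'
    set v := (takeQ q1' q2').1 with hv
    set q1'' := (takeQ q1' q2').2.1 with hq1''
    set q2'' := (takeQ q1' q2').2.2 with hq2''
    set t := mergeI q1'' q2'' with ht
    set s := u + v with hs
    -- shape and order facts about L = u :: v :: t
    have hLp : (u :: v :: t).Pairwise (· ≤ ·) := by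
      rw [← hm2, ← hm1]; exact mergeI_pairwise q1 q2 h1 h2
    have huv : u ≤ v := (List.pairwise_cons.mp hLp).1 v List.mem_cons_self
    have hvt : ∀ x ∈ t, v ≤ x :=
      (List.pairwise_cons.mp (List.pairwise_cons.mp hLp).2).1
    have htp : t.Pairwise (· ≤ ·) :=
      (List.pairwise_cons.mp (List.pairwise_cons.mp hLp).2).2
    have htperm : (q1'' ++ q2'').Perm t := (mergeI_perm q1'' q2'').symm
    have htlen : t.length = k' := by
      have h' := htperm.length_eq
      simp only [List.length_append] at h'
      omega
    have hmemt : ∀ z ∈ q2'', z ∈ t := fun z hz =>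
      htperm.mem_iff.mp (List.mem_append_right _ hz)
    -- every sum surviving in q2'' is at most the fresh sum s = u + v
    have hLq : (q1 ++ q2).Perm (u :: v :: t) := by
      rw [← hm2, ← hm1]; exact (mergeI_perm q1 q2).symm
    have hsurv : ∀ z ∈ q2'', z ≤ s := by
      intro z hz
      have hzq2 : z ∈ q2 := hsub2 (hsub2' hz)
      have hzt : z ∈ t := hmemt z hz
      have hvz : v ≤ z := hvt z hzt
      have htne : t ≠ [] := List.ne_nil_of_mem hzt
      have hlen3 : 3 ≤ q1.length + q2.length := by
        have := hLq.length_eq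
        simp only [List.length_append, List.length_cons] at this
        have : t.length ≠ 0 := fun he => htne (List.eq_nil_of_length_eq_zero he)
        omega
      have hz2 : z ≤ s2 (q1 ++ q2.erase z) := hinv z hzq2 hlen3
      have hperm : (q1 ++ q2.erase z).Perm ((u :: v :: t).erase z) :=
        (append_erase_perm q1 q2 z hzq2).trans (hLq.erase z)
      rw [s2_perm _ _ hperm] at hz2
      by_cases hzu : z = u
      · -- then u = v = z and the two smallest of the rest are v and the head of t
        have huv' : u = v := le_antisymm huv (hzu ▸ hvz)
        have he : (u :: v :: t).erase z = v :: t := by rw [hzu]; simp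
        rw [he] at hz2
        cases ht0 : t with
        | nil => exact absurd ht0 htne
        | cons t0 t' =>
          rw [ht0] at hz2
          have hvt0 : v ≤ t0 := hvt t0 (ht0 ▸ List.mem_cons_self)
          have ht0z : t0 ≤ z := by
            rcases List.mem_cons.mp (ht0 ▸ hzt) with h' | h'
            · omega
            · exact (List.pairwise_cons.mp (ht0 ▸ htp)).1 z h'
          rw [s2_sorted_cons v t0 t' (by
            refine List.pairwise_cons.mpr ⟨?_, ht0 ▸ htp⟩
            intro y hy
            exact hvt y (ht0 ▸ hy))] at hz2
          omega
      · by_cases hzv : z = v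
        · have he : (u :: v :: t).erase z = u :: t := by
            rw [hzv]
            rw [List.erase_cons_tail (by simp; omega), List.erase_cons_head]
          rw [he] at hz2
          cases ht0 : t with
          | nil => exact absurd ht0 htne
          | cons t0 t' =>
            rw [ht0] at hz2
            have hvt0 : v ≤ t0 := hvt t0 (ht0 ▸ List.mem_cons_self)
            have ht0z : t0 ≤ z := by
              rcases List.mem_cons.mp (ht0 ▸ hzt) with h' | h'
              · omega
              · exact (List.pairwise_cons.mp (ht0 ▸ htp)).1 z h'
            rw [s2_sorted_cons u t0 t' (by
              refine List.pairwise_cons.mpr ⟨?_, ht0 ▸ htp⟩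
              intro y hy
              exact le_trans huv (hvt y (ht0 ▸ hy)))] at hz2
            omega
        · have he : (u :: v :: t).erase z = u :: v :: t.erase z := by
            rw [List.erase_cons_tail (by simp; omega),
              List.erase_cons_tail (by simp; omega)]
          rw [he] at hz2
          rw [s2_sorted_cons u v (t.erase z) (by
            exact hLp.sublist ((List.erase_sublist.cons₂ v).cons₂ u))] at hz2
          exact hz2
    -- the updated back queue is still sorted
    have hq2s : (q2'' ++ [s]).Pairwise (· ≤ ·) := by
      rw [List.pairwise_append]
      exact ⟨hp2'', by simp, fun z hz y hy => by
        rw [List.mem_singleton.mp hy]; exact hsurv z hz⟩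
    -- the invariant is preserved
    have hinv' : InvQ q1'' (q2'' ++ [s]) := by
      intro z' hz' hlen3'
      have htlen2 : 2 ≤ t.length := by
        have h' := htperm.length_eq
        simp only [List.length_append, List.length_cons, List.length_nil] at hlen3' h'
        omega
      rcases List.mem_append.mp hz' with hzq | hzs1
      · have he : (q2'' ++ [s]).erase z' = q2''.erase z' ++ [s] :=
          List.erase_append_left _ hzq
        rw [he, ← List.append_assoc]
        have hperm : (q1'' ++ q2''.erase z').Perm (t.erase z') :=
          (append_erase_perm q1'' q2'' z' hzq).trans (htperm.erase z')
        rw [s2_perm _ _ (hperm.append_right [s])]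
        have hzt : z' ∈ t := hmemt z' hzq
        refine key_bound v z' s (t.erase z')
          (fun x hx => hvt x (List.erase_sublist.mem hx)) ?_
          (hvt z' hzt) (hsurv z' hzq) (by omega)
        have hl := List.length_erase_of_mem hzt
        intro heq
        rw [heq] at hl
        simp only [List.length_nil] at hl
        omega
      · have hz'' : z' = s := List.mem_singleton.mp hzs1
        have hperm : (q1'' ++ (q2'' ++ [s]).erase z').Perm t := by
          rw [hz'']
          exact ((erase_append_singleton_perm q2'' s).append_left q1'').trans htperm
        rw [s2_perm _ _ hperm, hz'']
        cases ht0 : t with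
        | nil => rw [ht0] at htlen2; simp at htlen2
        | cons t0 t' =>
          cases ht1 : t' with
          | nil => rw [ht0, ht1] at htlen2; simp at htlen2
          | cons t1 t'' =>
            rw [s2_sorted_cons t0 t1 t'' (by rw [← ht1, ← ht0]; exact htp)]
            have h0 : v ≤ t0 := hvt t0 (ht0 ▸ List.mem_cons_self)
            have h1' : v ≤ t1 := hvt t1 (by
              rw [ht0, ht1]
              exact List.mem_cons_of_mem _ List.mem_cons_self)
            omega
    -- apply the induction hypothesis and fold both loops one step
    have hIH := ih q1'' (q2'' ++ [s]) (acc + s) hp1'' hq2s (by simp; omega) hinv'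
    have hins : mergeI q1'' (q2'' ++ [s]) = insertSorted s t := by
      have hpm : (mergeI q1'' (q2'' ++ [s])).Perm (insertSorted s t) := by
        refine (mergeI_perm _ _).trans ?_
        rw [← List.append_assoc]
        exact ((htperm.append_right [s]).trans List.perm_append_comm).trans
          (insertSorted_perm s t htp).symm
      exact hpm.eq_of_pairwise (fun a b _ _ ha hb => le_antisymm ha hb)
        (mergeI_pairwise _ _ hp1'' hq2s) (insertSorted_pairwise s t htp)
    rw [hins] at hIH
    have hstep : twoQueueLoop (k' + 1) q1 q2 acc =
        twoQueueLoop k' q1'' (q2'' ++ [s]) (acc + s) := rfl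
    rw [hstep, hIH, hm1, hm2]
    conv_rhs => rw [altLoop]

-- ===== VERDICT (by name: the statement is the Claim_ definition above) =====
theorem min_overhead_spec : Claim_equal_min_overhead := by
  intro wires _
  unfold Spec_min_overhead min_overhead min_overhead_alt
  have hsp : (PySem.List.sorted wires (fun x => x) false).Pairwise (· ≤ ·) := by
    simpa using PySem.List.sorted_pairwise wires (fun x => x)
  have hA : minOverheadLoop wires 0 =
      altLoop (PySem.List.sorted wires (fun x => x) false) 0 :=
    loop_eq wires.length wires _ 0 rfl
      (PySem.List.sorted_perm wires (fun x => x) false).symm hsp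
  rw [hA]
  cases hL : PySem.List.sorted wires (fun x => x) false with
  | nil => simp [twoQueueLoop, altLoop]
  | cons a l =>
    rw [hL] at hsp
    have hb := bridge l.length (a :: l) [] 0 hsp (by simp) (by simp) (by
      intro z hz _; simp at hz)
    simp only [List.length_cons, Nat.add_sub_cancel]
    rw [mergeI_nil_right] at hb
    simpa using hb.symm
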